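-- pv_equiv track=rewrite | github.com/jmarcoares98/CptS355 | HW3/HW3.py | helpersearchDicts2
-- ===== SOURCE A (Python) =====
-- def helpersearchDicts2(tl2, k2, index):
--     t = tl2[index]
--     inDict = t[1]
--     size = len(inDict.values())
--     for (x, y) in inDict.items():
--         if x == k2:
--             return y
--         if index == t[0]:
--             size -= 1
--             if size == index:
--                 return None
--         else:
--             continue
--     return helpersearchDicts2(tl2, k2, index = t[0])
-- ===== SOURCE B (Python) =====
-- def helpersearchDicts2(tl2, k2, index):
--     # Walk the chain of nodes; a node that points to itself ends the chain.
--     while True: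
--         nxt, d = tl2[index]
--         if k2 in d:
--             return d[k2]
--         if nxt == index:
--             return None
--         index = nxt
-- ===== Notes on version B (the rewrite author's own statement) =====
-- stated objective: simpler
-- what changed: A's tail recursion with a per-item scan that counts down a size variable to decide when a self-looping node gives up is replaced by a plain iterative chain walk doing one dict membership test per node and stopping at a self-looping node.
-- intended difference: On chains that reach a self-looping node whose dict contains k2 only at a position past the size-countdown cutoff (position > len(dict)-1-index, with 0 <= len(dict)-1-index), A's countdown fires first and it returns None even though the key is present; B returns the stored value, which is what a key search should do. — e.g. on helpersearchDicts2([(0, [("x", 1)]), (1, [("b", 3), ("a", 7)])], "a", 1): A returns none, B returns some 7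
import Mathlib
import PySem

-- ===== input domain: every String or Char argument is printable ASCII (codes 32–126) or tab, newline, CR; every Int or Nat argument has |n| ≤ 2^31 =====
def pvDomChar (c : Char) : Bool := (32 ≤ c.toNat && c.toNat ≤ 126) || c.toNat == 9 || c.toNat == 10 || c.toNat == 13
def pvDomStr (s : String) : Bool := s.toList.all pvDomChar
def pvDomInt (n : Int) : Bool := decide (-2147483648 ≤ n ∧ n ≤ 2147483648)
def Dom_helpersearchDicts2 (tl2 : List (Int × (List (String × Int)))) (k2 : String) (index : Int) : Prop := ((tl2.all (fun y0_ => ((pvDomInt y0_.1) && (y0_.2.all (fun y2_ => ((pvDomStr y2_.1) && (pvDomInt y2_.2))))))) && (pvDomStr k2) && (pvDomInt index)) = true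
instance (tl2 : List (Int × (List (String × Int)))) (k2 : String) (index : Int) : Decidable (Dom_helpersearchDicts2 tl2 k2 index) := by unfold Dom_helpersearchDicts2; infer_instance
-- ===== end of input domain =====

-- B replaces A's tail recursion with size-countdown bookkeeping by a plain iterative
-- chain walk (objective: simpler); where A's countdown makes it miss a present key at a
-- self-looping node, B returns the key's value (see D_ below).

-- ===== PORT A =====
-- the 'for (x, y) in inDict.items():' loop of A, with its running 'size';
-- result: some r = the loop returned r (r : Option Int), none = the loop fell through
def pvLoopA (k2 : String) (index t0 : Int) : List (String × Int) → Int → Option (Option Int)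
  | [], _ => none
  | (x, y) :: rest, size =>
    if x == k2 then some (some y)
    else if index == t0 then
      (if size - 1 == index then some none else pvLoopA k2 index t0 rest (size - 1))
    else pvLoopA k2 index t0 rest size

-- A's recursion 'return helpersearchDicts2(tl2, k2, index = t[0])' with fuel to totalize;
-- none = IndexError or out of fuel (A never terminates then) — both excluded by Pre_
def pvGoA (tl2 : List (Int × (List (String × Int)))) (k2 : String) : Nat → Int → Option (Option Int)
  | 0, _ => none
  | fuel + 1, index =>
    match PySem.List.pyGet? tl2 index with
    | none => none
    | some t =>
      match pvLoopA k2 index t.1 (PySem.Dict.ofList t.2).items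
          (((PySem.Dict.values (PySem.Dict.ofList t.2)).length : Int)) with
      | some r => some r
      | none => pvGoA tl2 k2 fuel t.1

def helpersearchDicts2 (tl2 : List (Int × (List (String × Int)))) (k2 : String) (index : Int) : Option Int :=
  (pvGoA tl2 k2 (tl2.length + 3) index).getD none

-- ===== PORT B =====
-- Source B's 'while True:' chain walk, totalized with the same fuel as A's port
def pvGoB (tl2 : List (Int × (List (String × Int)))) (k2 : String) : Nat → Int → Option (Option Int)
  | 0, _ => none
  | fuel + 1, index =>
    (PySem.List.pyGet? tl2 index).bind fun t =>
      match (PySem.Dict.ofList t.2).get? k2 with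
      | some v => some (some v)
      | none => if t.1 == index then some none else pvGoB tl2 k2 fuel t.1

def helpersearchDicts2_alt (tl2 : List (Int × (List (String × Int)))) (k2 : String) (index : Int) : Option Int :=
  (pvGoB tl2 k2 (tl2.length + 3) index).getD none

-- ===== PRECONDITION & SPEC =====
-- the index at which the search chain from `index` comes to rest: hop along stored
-- indices, stopping at a node that holds k2 or points to itself (tl2.length + 2 hops
-- suffice: a chain that ever stops cannot revisit a node)
def pvRest (tl2 : List (Int × (List (String × Int)))) (k2 : String) (index : Int) : Option Int :=
  (fun s : Option Int => s.bind fun i =>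
      (PySem.List.pyGet? tl2 i).map fun t =>
        if i == t.1 || (PySem.Dict.ofList t.2).keys.contains k2 then i else t.1)^[tl2.length + 2]
    (some index)

-- Pre_ holds exactly when A terminates normally: the chain comes to rest at a node that
-- holds k2, or at a self-looping node whose index lies in [0, len(dict)); elsewhere A
-- raises IndexError or RecursionError.
def Pre_helpersearchDicts2 (tl2 : List (Int × (List (String × Int)))) (k2 : String) (index : Int) : Prop :=
  ((pvRest tl2 k2 index).bind fun j =>
    (PySem.List.pyGet? tl2 j).map fun t =>
      (PySem.Dict.ofList t.2).keys.contains k2 ||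
        (j == t.1 && decide (0 ≤ j) && decide (j < ((PySem.Dict.ofList t.2).size : Int))))
    = some true
instance (tl2 : List (Int × (List (String × Int)))) (k2 : String) (index : Int) : Decidable (Pre_helpersearchDicts2 tl2 k2 index) := by unfold Pre_helpersearchDicts2; infer_instance

def pvWitness_helpersearchDicts2 : (List (Int × (List (String × Int)))) × String × Int :=
  ([(1, [("a", 5)]), (1, [("b", 7), ("c", 8)])], "b", 0)

-- On chains that come to rest at a self-looping node holding k2 only at a position past
-- A's size-countdown cutoff (keys.index(k2) > len(dict)-1-index with 0 ≤ len(dict)-1-index),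
-- A returns None even though the key is present; B returns the stored value, which is what
-- a key search should do.
def D_helpersearchDicts2 (tl2 : List (Int × (List (String × Int)))) (k2 : String) (index : Int) : Prop :=
  ((pvRest tl2 k2 index).bind fun j =>
    (PySem.List.pyGet? tl2 j).map fun t =>
      j == t.1 && ((PySem.List.index? (PySem.Dict.ofList t.2).keys k2).any fun (p : Nat) =>
        decide (0 ≤ ((PySem.Dict.ofList t.2).size : Int) - 1 - j ∧
          ((PySem.Dict.ofList t.2).size : Int) - 1 - j < (p : Int))))
    = some true
instance (tl2 : List (Int × (List (String × Int)))) (k2 : String) (index : Int) : Decidable (D_helpersearchDicts2 tl2 k2 index) := by unfold D_helpersearchDicts2; infer_instance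

def Spec_helpersearchDicts2 (tl2 : List (Int × (List (String × Int)))) (k2 : String) (index : Int) (out : Option Int) : Prop := ¬ D_helpersearchDicts2 tl2 k2 index → out = helpersearchDicts2_alt tl2 k2 index
instance (tl2 : List (Int × (List (String × Int)))) (k2 : String) (index : Int) (out : Option Int) : Decidable (Spec_helpersearchDicts2 tl2 k2 index out) := by unfold Spec_helpersearchDicts2; infer_instance

def pvDiffWitness_helpersearchDicts2 : (List (Int × (List (String × Int)))) × String × Int :=
  ([(0, [("x", 1)]), (1, [("b", 3), ("a", 7)])], "a", 1)

def pvDiffWitnessOut_helpersearchDicts2 : (Option Int) × (Option Int) := (none, some 7)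

-- ===== CLAIM (what is proved, stated in full; the proofs are below) =====
def Claim_unchanged_helpersearchDicts2 : Prop := ∀ (tl2 : List (Int × (List (String × Int)))) (k2 : String) (index : Int), Dom_helpersearchDicts2 tl2 k2 index → Pre_helpersearchDicts2 tl2 k2 index → Spec_helpersearchDicts2 tl2 k2 index (helpersearchDicts2 tl2 k2 index)
def Claim_changed_helpersearchDicts2 : Prop := Dom_helpersearchDicts2 (pvDiffWitness_helpersearchDicts2.1) (pvDiffWitness_helpersearchDicts2.2.1) (pvDiffWitness_helpersearchDicts2.2.2) ∧ Pre_helpersearchDicts2 (pvDiffWitness_helpersearchDicts2.1) (pvDiffWitness_helpersearchDicts2.2.1) (pvDiffWitness_helpersearchDicts2.2.2) ∧ D_helpersearchDicts2 (pvDiffWitness_helpersearchDicts2.1) (pvDiffWitness_helpersearchDicts2.2.1) (pvDiffWitness_helpersearchDicts2.2.2) ∧ helpersearchDicts2 (pvDiffWitness_helpersearchDicts2.1) (pvDiffWitness_helpersearchDicts2.2.1) (pvDiffWitness_helpersearchDicts2.2.2) = pvDiffWitnessOut_helpersearchDicts2.1 ∧ helpersearchDicts2_alt (pvDiffWitness_helpersearchDicts2.1)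 (pvDiffWitness_helpersearchDicts2.2.1) (pvDiffWitness_helpersearchDicts2.2.2) = pvDiffWitnessOut_helpersearchDicts2.2 ∧ pvDiffWitnessOut_helpersearchDicts2.1 ≠ pvDiffWitnessOut_helpersearchDicts2.2
def Claim_exact_helpersearchDicts2 : Prop := ∀ (tl2 : List (Int × (List (String × Int)))) (k2 : String) (index : Int), Dom_helpersearchDicts2 tl2 k2 index → Pre_helpersearchDicts2 tl2 k2 index → D_helpersearchDicts2 tl2 k2 index → helpersearchDicts2 tl2 k2 index ≠ helpersearchDicts2_alt tl2 k2 index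

-- ===== LEMMAS AND PROOFS =====
-- A-termination restated as a fuel recursion (proof-side only): a node resolves A's
-- search when the key is present or it is a self-loop with stored index in [0, len-1]
def pvSettles (k2 : String) (i : Int) (t : Int × (List (String × Int))) : Bool :=
  ((PySem.Dict.ofList t.2).get? k2).isSome ||
    (i == t.1 && decide (0 ≤ i) && decide (i ≤ (PySem.Dict.size (PySem.Dict.ofList t.2) : Int) - 1))

def pvReach (tl2 : List (Int × (List (String × Int)))) (k2 : String) : Nat → Int → Bool
  | 0, _ => false
  | fuel + 1, i =>
    match PySem.List.pyGet? tl2 i with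
    | none => false
    | some t => pvSettles k2 i t || pvReach tl2 k2 fuel t.1

-- the change region restated as a fuel recursion (proof-side only)
def pvBadChain (tl2 : List (Int × (List (String × Int)))) (k2 : String) : Nat → Int → Bool
  | 0, _ => false
  | fuel + 1, i =>
    match PySem.List.pyGet? tl2 i with
    | none => false
    | some t =>
      match PySem.List.index? (((PySem.Dict.ofList t.2).items).map Prod.fst) k2 with
      | some p =>
        i == t.1 &&
          decide (0 ≤ ((((PySem.Dict.ofList t.2).items).length : Int) - 1 - i)) &&
          decide (((((PySem.Dict.ofList t.2).items).length : Int) - 1 - i) < (p : Int))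
      | none => if i == t.1 then false else pvBadChain tl2 k2 fuel t.1


theorem index?_cons {a : Type} [BEq a] (x : a) (xs : List a) (v : a) :
    PySem.List.index? (x :: xs) v
      = if x == v then some 0 else (PySem.List.index? xs v).map (· + 1) := by
  simp [PySem.List.index?, List.idxOf?, List.findIdx?_cons]

-- outcome of A's item loop at a SELF-LOOPING node (index = t0), as a function of the
-- countdown c = size - 1 - index: return the key's value, give up with None at position c,
-- or fall through
def gSelf (k2 : String) (l : List (String × Int)) (c : Int) : Option (Option Int) :=
  match l.find? (fun p => p.1 == k2) with
  | some q =>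
    match PySem.List.index? (l.map Prod.fst) k2 with
    | some p => if 0 ≤ c ∧ c < (p : Int) then some none else some (some q.2)
    | none => if 0 ≤ c then some none else some (some q.2)
  | none => if 0 ≤ c ∧ c < (l.length : Int) then some none else none

theorem gSelf_cons_eq (k2 : String) (y : Int) (rest : List (String × Int)) (c : Int) :
    gSelf k2 ((k2, y) :: rest) c = some (some y) := by
  have hfc : List.find? (fun q => q.1 == k2) ((k2, y) :: rest) = some (k2, y) := by
    simp
  have hic : PySem.List.index? (((k2, y) :: rest).map Prod.fst) k2 = some 0 := by
    rw [List.map_cons, index?_cons]; simp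
  simp only [gSelf, hfc, hic]
  rw [if_neg (by push_cast; omega)]

theorem gSelf_cons_zero (k2 x : String) (y : Int) (rest : List (String × Int))
    (hx : (x == k2) = false) : gSelf k2 ((x, y) :: rest) 0 = some none := by
  have hfc : List.find? (fun q => q.1 == k2) ((x, y) :: rest)
      = List.find? (fun q => q.1 == k2) rest := by
    simp [hx]
  have hic : PySem.List.index? (((x, y) :: rest).map Prod.fst) k2
      = (PySem.List.index? (rest.map Prod.fst) k2).map (· + 1) := by
    rw [List.map_cons, index?_cons]; simp [hx]
  simp only [gSelf, hfc, hic, List.length_cons]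
  rcases hf : List.find? (fun q => q.1 == k2) rest with _ | q
  · simp [hf]
  · rcases hp : PySem.List.index? (rest.map Prod.fst) k2 with _ | p
    · simp [hf]
    · simp [hf]

theorem gSelf_cons_ne (k2 x : String) (y : Int) (rest : List (String × Int)) (c : Int)
    (hx : (x == k2) = false) (hc : c ≠ 0) :
    gSelf k2 ((x, y) :: rest) c = gSelf k2 rest (c - 1) := by
  have hfc : List.find? (fun q => q.1 == k2) ((x, y) :: rest)
      = List.find? (fun q => q.1 == k2) rest := by
    simp [hx]
  have hic : PySem.List.index? (((x, y) :: rest).map Prod.fst) k2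
      = (PySem.List.index? (rest.map Prod.fst) k2).map (· + 1) := by
    rw [List.map_cons, index?_cons]; simp [hx]
  simp only [gSelf, hfc, hic, List.length_cons]
  rcases hf : List.find? (fun q => q.1 == k2) rest with _ | q
  · simp only [hf]
    split_ifs <;> first | rfl | (push_cast at *; omega)
  · rcases hp : PySem.List.index? (rest.map Prod.fst) k2 with _ | p
    · simp only [hf, Option.map_none]
      split_ifs <;> first | rfl | omega
    · simp only [hf, Option.map_some]
      split_ifs <;> first | rfl | (push_cast at *; omega)

theorem loopA_self (k2 : String) (i : Int) :
    ∀ (l : List (String × Int)) (s : Int), pvLoopA k2 i i l s = gSelf k2 l (s - 1 - i)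
  | [], s => by
    simp only [pvLoopA, gSelf, List.find?_nil, List.length_nil, Nat.cast_zero]
    rw [if_neg (by omega)]
  | (x, y) :: rest, s => by
    by_cases hx : x = k2
    · subst hx
      simp [pvLoopA, gSelf_cons_eq]
    · have hx' : (x == k2) = false := by simp [hx]
      by_cases hs : s - 1 = i
      · simp only [pvLoopA, hx', Bool.false_eq_true, if_false, beq_self_eq_true, if_true]
        rw [if_pos (by simpa using hs)]
        rw [show s - 1 - i = 0 by omega, gSelf_cons_zero k2 x y rest hx']
      · simp only [pvLoopA, hx', Bool.false_eq_true, if_false, beq_self_eq_true, if_true]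
        rw [if_neg (by simpa using hs)]
        rw [loopA_self k2 i rest (s - 1), gSelf_cons_ne k2 x y rest _ hx' (by omega)]
        ring_nf

theorem loopA_nonself (k2 : String) (i t0 : Int) (h : i ≠ t0) :
    ∀ (l : List (String × Int)) (s : Int),
      pvLoopA k2 i t0 l s = (l.find? (fun p => p.1 == k2)).map (fun q => some q.2)
  | [], s => by simp [pvLoopA]
  | (x, y) :: rest, s => by
    have ht : (i == t0) = false := by simp [h]
    by_cases hx : x = k2
    · subst hx; simp [pvLoopA]
    · have hx' : (x == k2) = false := by simp [hx]
      simp only [pvLoopA, hx', ht, Bool.false_eq_true, if_false]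
      rw [List.find?_cons_of_neg (by simp_all)]
      exact loopA_nonself k2 i t0 h rest s

theorem find?_none_iff_index?_none (k2 : String) (l : List (String × Int)) :
    l.find? (fun p => p.1 == k2) = none ↔ PySem.List.index? (l.map Prod.fst) k2 = none := by
  induction l with
  | nil => simp [PySem.List.index?, List.idxOf?]
  | cons p rest ih =>
    rw [List.map_cons, index?_cons]
    by_cases hx : p.1 = k2
    · simp [hx]
    · have hx' : (p.1 == k2) = false := by simp [hx]
      rw [List.find?_cons_of_neg (by simp_all), hx']
      simpa using ih

-- a non-resolving self-looping node is never reached successfully, whatever the fuel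
theorem selfloop_noreach (tl2 : List (Int × (List (String × Int)))) (k2 : String) (i : Int)
    (t : Int × (List (String × Int))) (hg : PySem.List.pyGet? tl2 i = some t) (ht : t.1 = i)
    (hs : pvSettles k2 i t = false) :
    ∀ f, pvReach tl2 k2 f i = false
  | 0 => rfl
  | f + 1 => by
    simp only [pvReach, hg, hs, Bool.false_or, ht]
    exact selfloop_noreach tl2 k2 i t hg ht hs f

-- joint characterisation: on reachable inputs A's and B's fuel loops agree off pvBadChain,
-- and on pvBadChain A yields None while B yields the key's value
theorem main_chain (tl2 : List (Int × (List (String × Int)))) (k2 : String) :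
    ∀ (fuel : Nat) (i : Int), pvReach tl2 k2 fuel i = true →
      (pvBadChain tl2 k2 fuel i = false → pvGoA tl2 k2 fuel i = pvGoB tl2 k2 fuel i) ∧
      (pvBadChain tl2 k2 fuel i = true → pvGoA tl2 k2 fuel i = some none ∧
        ∃ y, pvGoB tl2 k2 fuel i = some (some y))
  | 0, i => by intro h; exact absurd h (by simp [pvReach])
  | fuel + 1, i => by
    intro hreach
    rcases hg : PySem.List.pyGet? tl2 i with _ | t
    · rw [pvReach, hg] at hreach; exact absurd hreach (by simp)
    · simp only [pvReach, hg] at hreach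
      have hget : (PySem.Dict.ofList t.2).get? k2
          = ((PySem.Dict.ofList t.2).items.find? (fun p => p.1 == k2)).map Prod.snd := rfl
      have hvals : ((PySem.Dict.values (PySem.Dict.ofList t.2)).length : Int)
          = (((PySem.Dict.ofList t.2).items.length : Nat) : Int) := by
        simp [PySem.Dict.values]
      have hsize : ((PySem.Dict.size (PySem.Dict.ofList t.2) : Nat) : Int)
          = (((PySem.Dict.ofList t.2).items.length : Nat) : Int) := rfl
      by_cases hi : i = t.1
      · -- self-looping node
        have ht' : (t.1 == i) = true := by simp [hi]
        have hii : (i == t.1) = true := by simp [hi]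
        simp only [pvGoA, pvGoB, pvBadChain, hg, Option.bind, ht', hii, if_true, Bool.true_and]
        rw [← hi, loopA_self, hvals]
        rcases hf : (PySem.Dict.ofList t.2).items.find? (fun p => p.1 == k2) with _ | q
        · -- key absent at the self-loop
          have hidx : PySem.List.index? ((PySem.Dict.ofList t.2).items.map Prod.fst) k2 = none :=
            (find?_none_iff_index?_none k2 _).1 hf
          simp only [gSelf, hf, hidx, hget, Option.map_none]
          refine ⟨fun _ => ?_, fun h => absurd h (by simp)⟩
          by_cases hc : 0 ≤ ((PySem.Dict.ofList t.2).items.length : Int) - 1 - i ∧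
              ((PySem.Dict.ofList t.2).items.length : Int) - 1 - i
                < ((PySem.Dict.ofList t.2).items.length : Int)
          · rw [if_pos hc]
          · rw [if_neg hc]
            exfalso
            have hsome : ((PySem.Dict.ofList t.2).get? k2).isSome = false := by
              rw [hget, hf]; rfl
            have hnot : ¬ (0 ≤ i ∧ i ≤ ((PySem.Dict.ofList t.2).items.length : Int) - 1) := by
              intro h; exact hc ⟨by omega, by omega⟩
            have hset : pvSettles k2 i t = false := by
              simp only [pvSettles, hsome, Bool.false_or, ← hi]
              rw [hsize]
              rcases Decidable.em ((0 : Int) ≤ i) with h0 | h0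
              · have h1 : ¬ i ≤ ((PySem.Dict.ofList t.2).items.length : Int) - 1 :=
                  fun h => hnot ⟨h0, h⟩
                simp [h1]
              · simp [h0]
            rw [hset, Bool.false_or, ← hi] at hreach
            rw [selfloop_noreach tl2 k2 i t hg hi.symm hset fuel] at hreach
            exact absurd hreach (by simp)
        · -- key present at the self-loop, at position p
          rcases hp : PySem.List.index? ((PySem.Dict.ofList t.2).items.map Prod.fst) k2 with _ | p
          · exact absurd hf (by simp [(find?_none_iff_index?_none k2 _).2 hp])
          · simp only [gSelf, hf, hp, hget, Option.map_some]
            by_cases hc : 0 ≤ ((PySem.Dict.ofList t.2).items.length : Int) - 1 - i ∧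
                ((PySem.Dict.ofList t.2).items.length : Int) - 1 - i < (p : Int)
            · refine ⟨fun hbadf => ?_, fun _ => ?_⟩
              · exfalso
                rw [decide_eq_true hc.1, decide_eq_true hc.2] at hbadf
                simp at hbadf
              · rw [if_pos hc]
                exact ⟨rfl, q.2, rfl⟩
            · refine ⟨fun _ => ?_, fun hbadt => ?_⟩
              · rw [if_neg hc]
              · exfalso
                simp only [Bool.and_eq_true, decide_eq_true_eq] at hbadt
                exact hc ⟨hbadt.1, hbadt.2⟩
      · -- node pointing elsewhere
        have ht' : (t.1 == i) = false := by rw [beq_eq_false_iff_ne]; exact Ne.symm hi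
        have hii : (i == t.1) = false := by simp [hi]
        simp only [pvGoA, pvGoB, pvBadChain, hg, Option.bind, ht', hii, Bool.false_and,
          Bool.false_eq_true, if_false]
        rw [loopA_nonself k2 i t.1 hi]
        rcases hf : (PySem.Dict.ofList t.2).items.find? (fun p => p.1 == k2) with _ | q
        · -- key absent: all three walks step to t.1
          have hidx : PySem.List.index? ((PySem.Dict.ofList t.2).items.map Prod.fst) k2 = none :=
            (find?_none_iff_index?_none k2 _).1 hf
          have hset : pvSettles k2 i t = false := by
            simp [pvSettles, hget, hf, hii]
          rw [hset, Bool.false_or] at hreach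
          simp only [hf, hidx, hget, Option.map_none]
          exact main_chain tl2 k2 fuel t.1 hreach
        · -- key present: both return its value, pvBadChain is false
          rcases hp : PySem.List.index? ((PySem.Dict.ofList t.2).items.map Prod.fst) k2 with _ | p
          · exact absurd hf (by simp [(find?_none_iff_index?_none k2 _).2 hp])
          · simp only [hf, hget, Option.map_some]
            refine ⟨fun _ => trivial, fun hbadt => ?_⟩
            simp at hbadt

-- pvRest's step function, named for the proofs
def pvStepR (tl2 : List (Int × (List (String × Int)))) (k2 : String) : Option Int → Option Int :=
  fun s => s.bind fun i =>
    (PySem.List.pyGet? tl2 i).map fun t =>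
      if i == t.1 || (PySem.Dict.ofList t.2).keys.contains k2 then i else t.1

theorem rest_eq (tl2 : List (Int × (List (String × Int)))) (k2 : String) (index : Int) :
    pvRest tl2 k2 index = (pvStepR tl2 k2)^[tl2.length + 2] (some index) := rfl

-- the per-node checks of Pre_ and D_, named for the proofs
def pvPreAt (k2 : String) (j : Int) (t : Int × (List (String × Int))) : Bool :=
  (PySem.Dict.ofList t.2).keys.contains k2 ||
    (j == t.1 && decide (0 ≤ j) && decide (j < ((PySem.Dict.ofList t.2).size : Int)))

def pvBadAt (k2 : String) (j : Int) (t : Int × (List (String × Int))) : Bool :=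
  j == t.1 && ((PySem.List.index? (PySem.Dict.ofList t.2).keys k2).any fun (p : Nat) =>
    decide (0 ≤ ((PySem.Dict.ofList t.2).size : Int) - 1 - j ∧
      ((PySem.Dict.ofList t.2).size : Int) - 1 - j < (p : Int)))

theorem Pre_iff (tl2 : List (Int × (List (String × Int)))) (k2 : String) (index : Int) :
    Pre_helpersearchDicts2 tl2 k2 index ↔
      ∃ j t, pvRest tl2 k2 index = some j ∧ PySem.List.pyGet? tl2 j = some t ∧
        pvPreAt k2 j t = true := by
  unfold Pre_helpersearchDicts2
  constructor
  · intro h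
    rcases hr : pvRest tl2 k2 index with _ | j
    · rw [hr] at h; exact absurd h (by simp)
    · rw [hr] at h
      rcases hg : PySem.List.pyGet? tl2 j with _ | t
      · simp only [Option.bind, hg, Option.map_none] at h
        exact absurd h (by simp)
      · simp only [Option.bind, hg, Option.map_some, Option.some_inj] at h
        exact ⟨j, t, rfl, hg, h⟩
  · rintro ⟨j, t, hr, hg, hat⟩
    rw [hr]
    simp only [Option.bind, hg, Option.map_some]
    exact congrArg some hat

theorem D_iff (tl2 : List (Int × (List (String × Int)))) (k2 : String) (index : Int) :
    D_helpersearchDicts2 tl2 k2 index ↔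
      ∃ j t, pvRest tl2 k2 index = some j ∧ PySem.List.pyGet? tl2 j = some t ∧
        pvBadAt k2 j t = true := by
  unfold D_helpersearchDicts2
  constructor
  · intro h
    rcases hr : pvRest tl2 k2 index with _ | j
    · rw [hr] at h; exact absurd h (by simp)
    · rw [hr] at h
      rcases hg : PySem.List.pyGet? tl2 j with _ | t
      · simp only [Option.bind, hg, Option.map_none] at h
        exact absurd h (by simp)
      · simp only [Option.bind, hg, Option.map_some, Option.some_inj] at h
        exact ⟨j, t, rfl, hg, h⟩
  · rintro ⟨j, t, hr, hg, hat⟩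
    rw [hr]
    simp only [Option.bind, hg, Option.map_some]
    exact congrArg some hat

theorem index?_isSome_eq_contains {a : Type} [BEq a] [LawfulBEq a] (v : a) :
    ∀ (l : List a), (PySem.List.index? l v).isSome = l.contains v
  | [] => rfl
  | x :: xs => by
    rw [index?_cons]
    by_cases hx : x = v
    · subst hx; simp
    · have h1 : (x == v) = false := by simp [hx]
      have h2 : (v == x) = false := by simp [Ne.symm hx]
      rw [h1]
      simp only [Bool.false_eq_true, if_false, Option.isSome_map, List.contains_cons, h2,
        Bool.false_or]
      exact index?_isSome_eq_contains v xs

theorem stepR_none (tl2 : List (Int × (List (String × Int)))) (k2 : String) :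
    ∀ (f : Nat), (pvStepR tl2 k2)^[f] none = none
  | 0 => rfl
  | f + 1 => by
    rw [Function.iterate_succ_apply]
    have h1 : pvStepR tl2 k2 none = none := rfl
    rw [h1, stepR_none tl2 k2 f]

theorem stepR_fix (tl2 : List (Int × (List (String × Int)))) (k2 : String) (j : Int)
    (t : Int × (List (String × Int))) (hg : PySem.List.pyGet? tl2 j = some t)
    (hstop : (j == t.1 || (PySem.Dict.ofList t.2).keys.contains k2) = true) :
    pvStepR tl2 k2 (some j) = some j := by
  simp only [pvStepR, Option.bind, hg, Option.map_some, hstop, if_true]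

theorem preAt_stop (k2 : String) (j : Int) (t : Int × (List (String × Int)))
    (h : pvPreAt k2 j t = true) :
    (j == t.1 || (PySem.Dict.ofList t.2).keys.contains k2) = true := by
  rw [pvPreAt] at h
  rcases hc : (PySem.Dict.ofList t.2).keys.contains k2 with _ | _
  · rw [hc, Bool.false_or] at h
    simp only [Bool.and_eq_true] at h
    rw [h.1.1]
    rfl
  · exact Bool.or_true _

theorem badAt_stop (k2 : String) (j : Int) (t : Int × (List (String × Int)))
    (h : pvBadAt k2 j t = true) :
    (j == t.1 || (PySem.Dict.ofList t.2).keys.contains k2) = true := by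
  rw [pvBadAt] at h
  simp only [Bool.and_eq_true] at h
  rw [h.1]
  rfl

theorem stepR_stop (tl2 : List (Int × (List (String × Int)))) (k2 : String) (j : Int)
    (t : Int × (List (String × Int))) (hg : PySem.List.pyGet? tl2 j = some t)
    (hstop : (j == t.1 || (PySem.Dict.ofList t.2).keys.contains k2) = true) :
    ∀ (f : Nat), (pvStepR tl2 k2)^[f] (some j) = some j
  | 0 => rfl
  | f + 1 => by
    rw [Function.iterate_succ_apply]
    rw [stepR_fix tl2 k2 j t hg hstop, stepR_stop tl2 k2 j t hg hstop f]

-- the resting node against the fuel recursions pvReach and pvBadChain: when pvReach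
-- holds the walk rests at a node satisfying the Pre_ check whose D_ check equals
-- pvBadChain; when it fails, no node seen within f - 1 hops satisfies the Pre_ check
theorem reach_rest (tl2 : List (Int × (List (String × Int)))) (k2 : String) :
    ∀ (f : Nat) (i : Int),
      (pvReach tl2 k2 f i = true →
        ∃ j t, (pvStepR tl2 k2)^[f] (some i) = some j ∧ PySem.List.pyGet? tl2 j = some t ∧
          pvPreAt k2 j t = true ∧ pvBadAt k2 j t = pvBadChain tl2 k2 f i) ∧
      (pvReach tl2 k2 f i = false →
        ∀ (g : Nat), g < f → ∀ j t, (pvStepR tl2 k2)^[g] (some i) = some j →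
          PySem.List.pyGet? tl2 j = some t → pvPreAt k2 j t = false)
  | 0, i => by
    constructor
    · intro h; exact absurd h (by simp [pvReach])
    · intro _ g hg; omega
  | f + 1, i => by
    rcases hg : PySem.List.pyGet? tl2 i with _ | t
    · constructor
      · intro h; rw [pvReach, hg] at h; exact absurd h (by simp)
      · intro _ g _ j t hj hgt
        rcases g with _ | h
        · injection hj with hj'
          rw [← hj', hg] at hgt
          exact absurd hgt (by simp)
        · rw [Function.iterate_succ_apply,
            show pvStepR tl2 k2 (some i) = none by simp [pvStepR, hg], stepR_none] at hj
          exact absurd hj (by simp)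
    · have hkeys : (PySem.Dict.ofList t.2).keys = (PySem.Dict.ofList t.2).items.map Prod.fst :=
        rfl
      have hsz : ((PySem.Dict.size (PySem.Dict.ofList t.2) : Nat) : Int)
          = (((PySem.Dict.ofList t.2).items.length : Nat) : Int) := rfl
      rcases hcont : (PySem.Dict.ofList t.2).keys.contains k2 with _ | _
      · -- key absent at this node
        have hidx : PySem.List.index? ((PySem.Dict.ofList t.2).items.map Prod.fst) k2 = none := by
          have h := index?_isSome_eq_contains k2 (PySem.Dict.ofList t.2).keys
          rw [hcont] at h
          rw [← hkeys]
          exact Option.not_isSome_iff_eq_none.1 (by rw [h]; simp)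
        have hsome : ((PySem.Dict.ofList t.2).get? k2).isSome = false := by
          show ((((PySem.Dict.ofList t.2).items.find? (fun p => p.1 == k2))).map Prod.snd).isSome
            = false
          rw [(find?_none_iff_index?_none k2 _).2 hidx]; rfl
        have hk : PySem.List.index? (PySem.Dict.ofList t.2).keys k2 = none := by
          rw [hkeys]; exact hidx
        have hbadat : pvBadAt k2 i t = false := by
          rw [pvBadAt, hk]
          simp
        rcases hself : (i == t.1) with _ | _
        · -- keyless node pointing elsewhere: all walks step to t.1
          have h1 : pvStepR tl2 k2 (some i) = some t.1 := by
            simp only [pvStepR, Option.bind, hg, Option.map_some, hself, hcont,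
              Bool.or_false, Bool.false_eq_true, if_false]
          have hset : pvSettles k2 i t = false := by
            simp [pvSettles, hsome, hself]
          have hreq : pvReach tl2 k2 (f + 1) i = pvReach tl2 k2 f t.1 := by
            simp only [pvReach, hg, hset, Bool.false_or]
          have hbeq : pvBadChain tl2 k2 (f + 1) i = pvBadChain tl2 k2 f t.1 := by
            simp only [pvBadChain, hg, hidx, hself, Bool.false_eq_true, if_false]
          have hpreat : pvPreAt k2 i t = false := by
            rw [pvPreAt, hcont, hself]
            rfl
          constructor
          · intro h
            rw [hreq] at h
            rw [Function.iterate_succ_apply, h1, hbeq]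
            exact (reach_rest tl2 k2 f t.1).1 h
          · intro h g hlt j t' hj hgt
            rw [hreq] at h
            rcases g with _ | gh
            · injection hj with hj'
              rw [← hj'] at hgt
              rw [hg] at hgt
              injection hgt with ht'
              rw [← hj', ← ht']
              exact hpreat
            · rw [Function.iterate_succ_apply, h1] at hj
              exact (reach_rest tl2 k2 f t.1).2 h gh (by omega) j t' hj hgt
        · -- keyless self-looping node: the walk rests here
          have hstay : ∀ g, (pvStepR tl2 k2)^[g] (some i) = some i :=
            stepR_stop tl2 k2 i t hg (by rw [hself]; simp)
          have hbad : pvBadChain tl2 k2 (f + 1) i = false := by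
            simp only [pvBadChain, hg, hidx, hself, if_true]
          have hpre_set : pvPreAt k2 i t = pvSettles k2 i t := by
            rw [pvPreAt, pvSettles, hcont, hsome, Bool.false_or, Bool.false_or, hself]
            rcases h0 : decide ((0 : Int) ≤ i) with _ | _
            · simp
            · simp only [Bool.true_and]
              rw [decide_eq_decide.2 (by omega :
                (i < ((PySem.Dict.size (PySem.Dict.ofList t.2) : Nat) : Int)) ↔
                  (i ≤ ((PySem.Dict.size (PySem.Dict.ofList t.2) : Nat) : Int) - 1))]
          rcases hset : pvSettles k2 i t with _ | _
          · -- A never settles: pvReach is false at every fuel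
            have hrf : ∀ g, pvReach tl2 k2 g i = false :=
              selfloop_noreach tl2 k2 i t hg (eq_of_beq hself).symm hset
            constructor
            · intro h; rw [hrf] at h; exact absurd h (by simp)
            · intro _ g _ j t' hj hgt
              rw [hstay] at hj
              injection hj with hj'
              rw [← hj'] at hgt
              rw [hg] at hgt
              injection hgt with ht'
              rw [← hj', ← ht', hpre_set, hset]
          · have hre : pvReach tl2 k2 (f + 1) i = true := by
              simp [pvReach, hg, hset]
            constructor
            · intro _
              exact ⟨i, t, hstay (f + 1), hg, by rw [hpre_set, hset], by rw [hbadat, hbad]⟩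
            · intro h; rw [hre] at h; exact absurd h (by simp)
      · -- key present at this node: the walk rests here, A and B settle here
        have hstay : ∀ g, (pvStepR tl2 k2)^[g] (some i) = some i :=
          stepR_stop tl2 k2 i t hg (by rw [hcont]; simp)
        have hpS : (PySem.List.index? (PySem.Dict.ofList t.2).keys k2).isSome = true := by
          rw [index?_isSome_eq_contains, hcont]
        rcases hp : PySem.List.index? (PySem.Dict.ofList t.2).keys k2 with _ | p
        · rw [hp] at hpS; exact absurd hpS (by simp)
        · have hidx : PySem.List.index? ((PySem.Dict.ofList t.2).items.map Prod.fst) k2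
              = some p := by rw [← hkeys]; exact hp
          have hsome : ((PySem.Dict.ofList t.2).get? k2).isSome = true := by
            show ((((PySem.Dict.ofList t.2).items.find? (fun p => p.1 == k2))).map
              Prod.snd).isSome = true
            rcases hf : (PySem.Dict.ofList t.2).items.find? (fun p => p.1 == k2) with _ | q
            · rw [(find?_none_iff_index?_none k2 _).1 hf] at hidx
              exact absurd hidx (by simp)
            · rw [hf]; rfl
          have hset : pvSettles k2 i t = true := by
            simp [pvSettles, hsome]
          have hre : pvReach tl2 k2 (f + 1) i = true := by
            simp [pvReach, hg, hset]
          have hbad : pvBadAt k2 i t = pvBadChain tl2 k2 (f + 1) i := by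
            rw [pvBadAt, hp]
            simp only [pvBadChain, hg, hidx, Option.any, Bool.decide_and, hsz, Bool.and_assoc]
          constructor
          · intro _
            exact ⟨i, t, hstay (f + 1), hg, by rw [pvPreAt, hcont]; rfl, hbad⟩
          · intro h; rw [hre] at h; exact absurd h (by simp)

-- ===== VERDICT (by name: the statement is the Claim_ definition above) =====
theorem helpersearchDicts2_spec : Claim_unchanged_helpersearchDicts2 := by
  intro tl2 k2 index _ hpre hnd
  obtain ⟨j, t, hr, hg, hat⟩ := (Pre_iff tl2 k2 index).1 hpre
  rw [rest_eq] at hr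
  have hreach : pvReach tl2 k2 (tl2.length + 3) index = true := by
    rcases hre : pvReach tl2 k2 (tl2.length + 3) index with _ | _
    · have := ((reach_rest tl2 k2 (tl2.length + 3) index).2 hre) (tl2.length + 2)
        (by omega) j t hr hg
      rw [hat] at this
      exact absurd this (by simp)
    · rfl
  have hr3 : (pvStepR tl2 k2)^[tl2.length + 3] (some index) = some j := by
    rw [show tl2.length + 3 = (tl2.length + 2) + 1 from rfl, Function.iterate_succ_apply',
      hr, stepR_fix tl2 k2 j t hg (preAt_stop k2 j t hat)]
  obtain ⟨j', t', hr', hg', _, hbadeq⟩ := (reach_rest tl2 k2 (tl2.length + 3) index).1 hreach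
  have e1 : j = j' := by
    rw [hr3] at hr'
    exact Option.some_inj.1 hr'
  have e2 : t = t' := by
    rw [e1] at hg
    rw [hg] at hg'
    exact Option.some_inj.1 hg'
  have hbf : pvBadChain tl2 k2 (tl2.length + 3) index = false := by
    rcases hba : pvBadAt k2 j t with _ | _
    · rw [← hbadeq, ← e1, ← e2, hba]
    · exact absurd ((D_iff tl2 k2 index).2 ⟨j, t, by rw [rest_eq]; exact hr, hg, hba⟩) hnd
  unfold helpersearchDicts2 helpersearchDicts2_alt
  rw [(main_chain tl2 k2 (tl2.length + 3) index hreach).1 hbf]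

theorem helpersearchDicts2_changed : Claim_changed_helpersearchDicts2 := by
  unfold Claim_changed_helpersearchDicts2; decide

theorem helpersearchDicts2_tight : Claim_exact_helpersearchDicts2 := by
  intro tl2 k2 index _ _ hd
  obtain ⟨j, t, hr, hg, hat⟩ := (D_iff tl2 k2 index).1 hd
  rw [rest_eq] at hr
  have hpreat : pvPreAt k2 j t = true := by
    rw [pvPreAt]
    have h1 : (PySem.Dict.ofList t.2).keys.contains k2 = true := by
      have h2 : (PySem.List.index? (PySem.Dict.ofList t.2).keys k2).isSome = true := by
        rcases hp : PySem.List.index? (PySem.Dict.ofList t.2).keys k2 with _ | p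
        · rw [pvBadAt, hp] at hat
          simp at hat
        · rfl
      rw [← index?_isSome_eq_contains]
      exact h2
    rw [h1]
    rfl
  have hreach : pvReach tl2 k2 (tl2.length + 3) index = true := by
    rcases hre : pvReach tl2 k2 (tl2.length + 3) index with _ | _
    · have := ((reach_rest tl2 k2 (tl2.length + 3) index).2 hre) (tl2.length + 2)
        (by omega) j t hr hg
      rw [hpreat] at this
      exact absurd this (by simp)
    · rfl
  have hr3 : (pvStepR tl2 k2)^[tl2.length + 3] (some index) = some j := by
    rw [show tl2.length + 3 = (tl2.length + 2) + 1 from rfl, Function.iterate_succ_apply',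
      hr, stepR_fix tl2 k2 j t hg (badAt_stop k2 j t hat)]
  obtain ⟨j', t', hr', hg', _, hbadeq⟩ := (reach_rest tl2 k2 (tl2.length + 3) index).1 hreach
  have e1 : j = j' := by
    rw [hr3] at hr'
    exact Option.some_inj.1 hr'
  have e2 : t = t' := by
    rw [e1] at hg
    rw [hg] at hg'
    exact Option.some_inj.1 hg'
  have hbt : pvBadChain tl2 k2 (tl2.length + 3) index = true := by
    rw [← hbadeq, ← e1, ← e2]
    exact hat
  obtain ⟨hA, y, hB⟩ := (main_chain tl2 k2 (tl2.length + 3) index hreach).2 hbt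
  unfold helpersearchDicts2 helpersearchDicts2_alt
  rw [hA, hB]
  simp
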